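-- pv_equiv track=rewrite | github.com/kevinbentley/popper_explainer | src/harness/generators/precondition_breaker.py | _multi_point_pattern
-- ===== SOURCE A (Python) =====
-- def _multi_point_pattern(length: int) -> str:
--     """Create multiple convergence points."""
--     if length < 6:
--         return "><" + "." * (length - 2)
--     # >.<.>.< pattern repeated
--     pattern = ">.<"
--     result = ""
--     while len(result) + len(pattern) <= length:
--         result += pattern
--     result += "." * (length - len(result))
--     return result
-- ===== SOURCE B (Python) =====
-- def _multi_point_pattern(length: int) -> str:
--     """Create multiple convergence points."""
--     if length < 6:
--         return "><" + "." * (length - 2)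
--     return ">.<" * (length // 3) + "." * (length % 3)
-- ===== Notes on version B (the rewrite author's own statement) =====
-- stated objective: faster
-- what changed: Replaced the while loop that accumulates '>.<' chunks (and the trailing-dot fill computed from the running length) with the closed form '>.<' * (length // 3) + '.' * (length % 3).
import Mathlib
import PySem

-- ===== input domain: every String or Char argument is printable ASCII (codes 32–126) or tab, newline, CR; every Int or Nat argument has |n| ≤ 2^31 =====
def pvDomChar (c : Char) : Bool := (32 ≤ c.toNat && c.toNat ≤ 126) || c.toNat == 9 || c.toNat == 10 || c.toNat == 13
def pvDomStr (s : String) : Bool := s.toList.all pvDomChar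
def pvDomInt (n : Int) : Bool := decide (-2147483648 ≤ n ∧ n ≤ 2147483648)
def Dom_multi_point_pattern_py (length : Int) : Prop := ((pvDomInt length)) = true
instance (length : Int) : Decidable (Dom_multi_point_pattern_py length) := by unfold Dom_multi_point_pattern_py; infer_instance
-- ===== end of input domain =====

-- B replaces A's while loop (accumulating ">.<" chunks, then padding by the running length)
-- with the closed form ">.<" * (length // 3) + "." * (length % 3); same value everywhere.

-- ===== PORT A =====
-- the while loop: 'while len(result) + len(pattern) <= length: result += pattern'
def pvLoopA (length : Int) (result : List Char) : List Char :=
  if (result.length : Int) + 3 ≤ length then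
    pvLoopA length (result ++ ['>', '.', '<'])
  else result
termination_by (length - result.length).toNat
decreasing_by simp only [List.length_append, List.length_cons, List.length_nil]; push_cast; omega

def multi_point_pattern_py (length : Int) : String :=
  if length < 6 then
    -- "><" + "." * (length - 2)   ('s * n' is empty for n ≤ 0, matching .toNat)
    String.ofList (['>', '<'] ++ List.replicate (length - 2).toNat '.')
  else
    let result := pvLoopA length []
    -- result += "." * (length - len(result))
    String.ofList (result ++ List.replicate (length - result.length).toNat '.')

-- ===== PORT B =====
def multi_point_pattern_py_alt (length : Int) : String :=
  if length < 6 then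
    String.ofList (['>', '<'] ++ List.replicate (length - 2).toNat '.')
  else
    String.ofList (PySem.List.pyRepeat ['>', '.', '<'] (PySem.Int.floordiv length 3) ++
               PySem.List.pyRepeat ['.'] (PySem.Int.mod length 3))

-- ===== PRECONDITION & SPEC =====
def Spec_multi_point_pattern_py (length : Int) (out : String) : Prop := out = multi_point_pattern_py_alt length
instance (length : Int) (out : String) : Decidable (Spec_multi_point_pattern_py length out) := by unfold Spec_multi_point_pattern_py; infer_instance

-- ===== CLAIM (what is proved, stated in full; the proofs are below) =====
def Claim_equal_multi_point_pattern_py : Prop := ∀ (length : Int), Dom_multi_point_pattern_py length → Spec_multi_point_pattern_py length (multi_point_pattern_py length)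

-- ===== LEMMAS AND PROOFS =====

theorem pvLoopA_eq (length : Int) : ∀ (k : Nat) (res : List Char),
    (length - res.length).toNat = k →
    pvLoopA length res
      = res ++ (List.replicate ((length - res.length) / 3).toNat ['>', '.', '<']).flatten := by
  intro k
  induction k using Nat.strong_induction_on with
  | _ k ih =>
    intro res hk
    rw [pvLoopA.eq_def]
    by_cases h : (res.length : Int) + 3 ≤ length
    · simp only [h, if_pos]
      rw [ih ((length - (res ++ ['>', '.', '<']).length).toNat) (by simp; omega) _ rfl]
      have hcount : ((length - res.length) / 3).toNat
          = ((length - (res ++ ['>', '.', '<']).length) / 3).toNat + 1 := by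
        simp only [List.length_append, List.length_cons, List.length_nil]; push_cast; omega
      rw [hcount, List.replicate_succ, List.flatten_cons, List.append_assoc]
    · simp only [h, if_neg, not_false_iff]
      have : ((length - res.length) / 3).toNat = 0 := by omega
      rw [this]
      simp

theorem flatten_replicate_length (n : Nat) :
    ((List.replicate n (['>', '.', '<'] : List Char)).flatten).length = 3 * n := by
  induction n with
  | zero => simp
  | succ m ih => rw [List.replicate_succ, List.flatten_cons, List.length_append, ih]; simp; omega

-- ===== VERDICT (by name: the statement is the Claim_ definition above) =====
theorem multi_point_pattern_py_spec : Claim_equal_multi_point_pattern_py := by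
  unfold Claim_equal_multi_point_pattern_py Spec_multi_point_pattern_py
  intro length _
  unfold multi_point_pattern_py multi_point_pattern_py_alt
  by_cases h : length < 6
  · simp [h]
  · rw [if_neg h, if_neg h]
    have hq := pvLoopA_eq length ((length - (([] : List Char).length : Int)).toNat) [] rfl
    simp only [List.length_nil, Int.natCast_zero, sub_zero, List.nil_append] at hq
    have hfd : PySem.Int.floordiv length 3 = length / 3 :=
      PySem.Int.floordiv_eq_ediv_of_pos (by omega)
    have hmd : PySem.Int.mod length 3 = length % 3 :=
      PySem.Int.mod_eq_emod_of_pos (by omega)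
    have hcnt : (length - (((List.replicate (length / 3).toNat
        (['>', '.', '<'] : List Char)).flatten).length : Int)).toNat = (length % 3).toNat := by
      rw [flatten_replicate_length]; omega
    simp only [hq]
    rw [hcnt, hfd, hmd, PySem.List.pyRepeat_singleton]
    simp only [PySem.List.pyRepeat]
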